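-- pv_equiv track=rewrite | github.com/gpahal/microgpt | src/microgpt/tokenizer/tokenizer_utils.py | _get_counts_dict
-- ===== SOURCE A (Python) =====
-- def _get_counts_dict(ids: list[int]) -> dict[tuple[int, int], int]:
--     """
--     Given a list of integers, return a dictionary of counts of consecutive pairs.
--     If an id is -1, it is considered a chunk boundary and not counted.
--
--     Example: ids=[1, 2, 3, -1, 1, 2, 4] -> {(1, 2): 2, (2, 3): 1, (2, 4): 1}
--
--     Args:
--         ids: The list of integers to count
--
--     Returns:
--         A dictionary of counts of consecutive pairs
--     """
--     counts_dict: dict[tuple[int, int], int] = {}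
--     for i in range(len(ids) - 1):
--         if ids[i] == -1 or ids[i + 1] == -1:
--             continue
--         pair = (ids[i], ids[i + 1])
--         counts_dict[pair] = counts_dict.get(pair, 0) + 1
--     return counts_dict
-- ===== SOURCE B (Python) =====
-- def _get_counts_dict(ids: list[int]) -> dict[tuple[int, int], int]:
--     """Split ids into -1-free chunks, then count adjacent pairs inside each chunk."""
--     chunks: list[list[int]] = []
--     cur: list[int] = []
--     for x in ids:
--         if x == -1:
--             if cur:
--                 chunks.append(cur)
--                 cur = []
--         else:
--             cur.append(x)
--     if cur:
--         chunks.append(cur)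
--     counts_dict: dict[tuple[int, int], int] = {}
--     for chunk in chunks:
--         for pair in zip(chunk, chunk[1:]):
--             counts_dict[pair] = counts_dict.get(pair, 0) + 1
--     return counts_dict
-- ===== Notes on version B (the rewrite author's own statement) =====
-- stated objective: alternative
-- what changed: Replaces A's flat index loop with -1 guards by a two-phase decomposition: first split ids into -1-free contiguous chunks, then count adjacent pairs via zip within each chunk.
import Mathlib
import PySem

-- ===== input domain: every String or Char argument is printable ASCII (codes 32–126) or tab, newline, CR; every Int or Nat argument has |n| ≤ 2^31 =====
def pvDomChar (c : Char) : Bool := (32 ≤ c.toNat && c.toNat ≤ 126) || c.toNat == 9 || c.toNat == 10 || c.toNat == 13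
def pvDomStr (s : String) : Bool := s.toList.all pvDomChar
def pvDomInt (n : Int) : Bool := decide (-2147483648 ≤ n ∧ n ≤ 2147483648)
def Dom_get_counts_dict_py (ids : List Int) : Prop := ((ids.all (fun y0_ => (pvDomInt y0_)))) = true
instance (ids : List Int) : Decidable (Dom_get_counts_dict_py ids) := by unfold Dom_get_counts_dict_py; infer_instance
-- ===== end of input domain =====

-- B replaces A's flat index loop (with a -1 guard on each pair) by a two-phase
-- decomposition: split ids into -1-free chunks, then count adjacent pairs per chunk.

-- ===== PORT A =====
-- A: for i in range(len(ids)-1): skip if ids[i]==-1 or ids[i+1]==-1, else count the pair.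
-- ids[i] is indexed only at 0 ≤ i < len(ids)-1, so pyGetD with default 0 is exact here.
def aCountsDict (ids : List Int) : PySem.Dict (Int × Int) Int :=
  (PySem.List.pyRange 0 (PySem.List.len ids - 1) 1).foldl
    (fun d i =>
      if PySem.List.pyGetD ids i 0 = -1 ∨ PySem.List.pyGetD ids (i + 1) 0 = -1 then d
      else PySem.Dict.modify d (PySem.List.pyGetD ids i 0, PySem.List.pyGetD ids (i + 1) 0) 0 (· + 1))
    PySem.Dict.empty

def get_counts_dict_py (ids : List Int) : List (Int × Int × Int) :=
  (aCountsDict ids).items.map (fun p => (p.1.1, p.1.2, p.2))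

-- ===== PORT B =====
-- B: first build the list of -1-free chunks with a (chunks, cur) accumulator,
-- then, per chunk, count each pair of zip(chunk, chunk[1:]); chunk[1:] = tail.
def bSplit (ids : List Int) : List (List Int) × List Int :=
  ids.foldl
    (fun (st : List (List Int) × List Int) x =>
      if x = -1 then (if st.2 ≠ [] then (st.1 ++ [st.2], ([] : List Int)) else (st.1, []))
      else (st.1, st.2 ++ [x]))
    ([], [])

def bChunks (ids : List Int) : List (List Int) :=
  (bSplit ids).1 ++ (if (bSplit ids).2 ≠ [] then [(bSplit ids).2] else [])

def bCountsDict (ids : List Int) : PySem.Dict (Int × Int) Int :=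
  (bChunks ids).foldl
    (fun d chunk =>
      (chunk.zip chunk.tail).foldl (fun d pair => PySem.Dict.modify d pair 0 (· + 1)) d)
    PySem.Dict.empty

def get_counts_dict_py_alt (ids : List Int) : List (Int × Int × Int) :=
  (bCountsDict ids).items.map (fun p => (p.1.1, p.1.2, p.2))

-- ===== PRECONDITION & SPEC =====
def Spec_get_counts_dict_py (ids : List Int) (out : List (Int × Int × Int)) : Prop := out = get_counts_dict_py_alt ids
instance (ids : List Int) (out : List (Int × Int × Int)) : Decidable (Spec_get_counts_dict_py ids out) := by unfold Spec_get_counts_dict_py; infer_instance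

-- ===== CLAIM (what is proved, stated in full; the proofs are below) =====
def Claim_equal_get_counts_dict_py : Prop := ∀ (ids : List Int), Dom_get_counts_dict_py ids → Spec_get_counts_dict_py ids (get_counts_dict_py ids)

-- ===== LEMMAS AND PROOFS =====

-- adjacent pairs of a list
def adjPairs : List Int → List (Int × Int)
  | a :: b :: t => (a, b) :: adjPairs (b :: t)
  | _ => []

-- the valid (no -1 on either side) adjacent pairs, scanned with the previous non-boundary element
def vpFrom : Option Int → List Int → List (Int × Int)
  | _, [] => []
  | prev, x :: t =>
    if x = -1 then vpFrom none t
    else (match prev with | some p => [(p, x)] | none => []) ++ vpFrom (some x) t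

def filterAdj (l : List Int) : List (Int × Int) :=
  (adjPairs l).filter (fun p => decide (¬(p.1 = -1 ∨ p.2 = -1)))

lemma foldl_skip_eq_foldl_filter {α : Type} (g : α → (Int × Int) → α) :
    ∀ (ps : List (Int × Int)) (d : α),
      ps.foldl (fun d p => if p.1 = -1 ∨ p.2 = -1 then d else g d p) d
        = (ps.filter (fun p => decide (¬(p.1 = -1 ∨ p.2 = -1)))).foldl g d := by
  intro ps
  induction ps with
  | nil => intro d; rfl
  | cons p t ih =>
    intro d
    by_cases h : p.1 = -1 ∨ p.2 = -1 <;> simp [List.foldl, List.filter, h, ih]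

lemma range_fold_eq_adjPairs_fold {α : Type} (f : α → Int → Int → α) :
    ∀ (l : List Int) (d : α),
      (List.range (l.length - 1)).foldl (fun d k => f d (l.getD k 0) (l.getD (k + 1) 0)) d
        = (adjPairs l).foldl (fun d p => f d p.1 p.2) d := by
  intro l
  induction l with
  | nil => intro d; rfl
  | cons a t ih =>
    intro d
    cases t with
    | nil => rfl
    | cons b t' =>
      have hlen : (a :: b :: t').length - 1 = (b :: t').length - 1 + 1 := by
        simp
      rw [hlen, List.range_succ_eq_map, List.foldl_cons, List.foldl_map]
      simp only [List.getD_cons_zero, List.getD_cons_succ, adjPairs, List.foldl_cons]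
      simpa using ih (f d a b)

-- A's pyRange fold is the List.range fold above
lemma pyrange_fold_eq {α : Type} (f : α → Int → Int → α) (l : List Int) (d : α) :
    (PySem.List.pyRange 0 (PySem.List.len l - 1) 1).foldl
        (fun d i => f d (PySem.List.pyGetD l i 0) (PySem.List.pyGetD l (i + 1) 0)) d
      = (List.range (l.length - 1)).foldl (fun d k => f d (l.getD k 0) (l.getD (k + 1) 0)) d := by
  rw [PySem.List.pyRange_one, List.foldl_map]
  have h1 : ((PySem.List.len l - 1) - 0).toNat = l.length - 1 := by
    simp [PySem.List.len_eq]
  rw [h1]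
  apply PySem.List.foldl_congr_mem
  intro acc k _
  have h3 : (k : Int) + 1 = ((k + 1 : Nat) : Int) := by push_cast; ring
  simp only [zero_add, h3, PySem.List.pyGetD_natCast]

lemma zip_tail_eq_adjPairs : ∀ (l : List Int), l.zip l.tail = adjPairs l := by
  intro l
  induction l with
  | nil => rfl
  | cons a t ih =>
    cases t with
    | nil => rfl
    | cons b t' => simpa [adjPairs, List.zip] using ih

lemma adjPairs_append_singleton : ∀ (l : List Int) (x : Int),
    adjPairs (l ++ [x]) = adjPairs l ++ (match l.getLast? with | some p => [(p, x)] | none => []) := by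
  intro l
  induction l with
  | nil => intro x; rfl
  | cons a t ih =>
    intro x
    cases t with
    | nil => rfl
    | cons b t' =>
      simp only [List.cons_append, adjPairs, List.getLast?_cons_cons]
      rw [show b :: (t' ++ [x]) = (b :: t') ++ [x] from rfl, ih x]

lemma foldl_flatMap {α β γ : Type} (g : β → List γ) (f : α → γ → α) :
    ∀ (l : List β) (d : α), (l.flatMap g).foldl f d = l.foldl (fun d c => (g c).foldl f d) d := by
  intro l
  induction l with
  | nil => intro d; rfl
  | cons c t ih => intro d; simp [List.flatMap_cons, List.foldl_append, ih]

lemma filterAdj_neg_one_cons : ∀ (r : List Int), filterAdj (-1 :: r) = filterAdj r := by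
  intro r
  cases r with
  | nil => rfl
  | cons y r' => simp [filterAdj, adjPairs]

lemma vpFrom_eq_filterAdj : ∀ (t : List Int),
    (∀ p : Int, p ≠ -1 → vpFrom (some p) t = filterAdj (p :: t)) ∧ vpFrom none t = filterAdj t := by
  intro t
  induction t with
  | nil =>
    refine ⟨fun p _ => ?_, rfl⟩
    simp [vpFrom, filterAdj, adjPairs]
  | cons x r ih =>
    obtain ⟨ih1, ih2⟩ := ih
    by_cases hx : x = -1
    · subst hx
      refine ⟨fun p hp => ?_, ?_⟩
      · show vpFrom none r = filterAdj (p :: -1 :: r)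
        rw [ih2]
        have h4 : filterAdj (p :: -1 :: r) = filterAdj (-1 :: r) := by
          simp [filterAdj, adjPairs]
        rw [h4, filterAdj_neg_one_cons]
      · show vpFrom none r = filterAdj (-1 :: r)
        rw [ih2, filterAdj_neg_one_cons]
    · refine ⟨fun p hp => ?_, ?_⟩
      · show vpFrom (some p) (x :: r) = filterAdj (p :: x :: r)
        simp only [vpFrom, if_neg hx]
        rw [ih1 x hx]
        simp [filterAdj, adjPairs, hp, hx]
      · show vpFrom none (x :: r) = filterAdj (x :: r)
        simp only [vpFrom, if_neg hx]
        rw [ih1 x hx]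
        simp

-- the B split loop, packaged
def chunksFrom (cs : List (List Int)) (cur : List Int) (ids : List Int) : List (List Int) :=
  let st :=
    ids.foldl
      (fun (st : List (List Int) × List Int) x =>
        if x = -1 then (if st.2 ≠ [] then (st.1 ++ [st.2], ([] : List Int)) else (st.1, []))
        else (st.1, st.2 ++ [x]))
      (cs, cur)
  st.1 ++ (if st.2 ≠ [] then [st.2] else [])

lemma chunksFrom_flat : ∀ (ids : List Int) (cs : List (List Int)) (cur : List Int),
    (chunksFrom cs cur ids).flatMap adjPairs
      = cs.flatMap adjPairs ++ adjPairs cur ++ vpFrom cur.getLast? ids := by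
  intro ids
  induction ids with
  | nil =>
    intro cs cur
    by_cases hc : cur = []
    · subst hc; simp [chunksFrom, vpFrom, adjPairs]
    · simp [chunksFrom, hc, vpFrom]
  | cons x t ih =>
    intro cs cur
    by_cases hx : x = -1
    · subst hx
      by_cases hc : cur = []
      · subst hc
        have hstep : chunksFrom cs [] ((-1) :: t) = chunksFrom cs [] t := by
          simp [chunksFrom, List.foldl_cons]
        rw [hstep, ih cs []]
        simp [vpFrom, adjPairs]
      · have hstep : chunksFrom cs cur ((-1) :: t) = chunksFrom (cs ++ [cur]) [] t := by
          simp [chunksFrom, List.foldl_cons, hc]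
        rw [hstep, ih (cs ++ [cur]) []]
        simp [vpFrom, adjPairs, List.flatMap_append, List.append_assoc]
    · have hstep : chunksFrom cs cur (x :: t) = chunksFrom cs (cur ++ [x]) t := by
        simp [chunksFrom, List.foldl_cons, hx]
      rw [hstep, ih cs (cur ++ [x]), adjPairs_append_singleton]
      simp only [List.getLast?_concat]
      cases hg : cur.getLast? with
      | none => simp [vpFrom, hx, List.append_assoc]
      | some p => simp [vpFrom, hx, List.append_assoc]

-- ===== VERDICT (by name: the statement is the Claim_ definition above) =====
theorem get_counts_dict_py_spec : Claim_equal_get_counts_dict_py := by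
  intro ids _
  show get_counts_dict_py ids = get_counts_dict_py_alt ids
  unfold get_counts_dict_py get_counts_dict_py_alt
  congr 1
  -- A's dict fold becomes a fold over vpFrom none ids
  unfold aCountsDict
  rw [pyrange_fold_eq (fun d a b => if a = -1 ∨ b = -1 then d
        else PySem.Dict.modify d (a, b) 0 (· + 1)),
      range_fold_eq_adjPairs_fold (fun d a b => if a = -1 ∨ b = -1 then d
        else PySem.Dict.modify d (a, b) 0 (· + 1)), foldl_skip_eq_foldl_filter]
  rw [show ((adjPairs ids).filter (fun p => decide (¬(p.1 = -1 ∨ p.2 = -1))))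
        = filterAdj ids from rfl, ← (vpFrom_eq_filterAdj ids).2]
  -- B's dict fold is the same fold over vpFrom none ids
  unfold bCountsDict
  have hch : bChunks ids = chunksFrom [] [] ids := rfl
  rw [hch]
  have hzip : (fun (d : PySem.Dict (Int × Int) Int) chunk =>
        (chunk.zip chunk.tail).foldl (fun d pair => PySem.Dict.modify d pair 0 (· + 1)) d)
      = fun d chunk => (adjPairs chunk).foldl (fun d pair => PySem.Dict.modify d pair 0 (· + 1)) d := by
    funext d chunk
    rw [← zip_tail_eq_adjPairs]
  rw [hzip, ← foldl_flatMap, chunksFrom_flat]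
  simp [adjPairs]
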